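-- pv_equiv track=rewrite | github.com/nicogreeco/University | Sapienza University of Rome/Computer Science assignment/Rosalind/REVP.py | is_reverse_pal
-- ===== SOURCE A (Python) =====
-- def is_reverse_pal(sub):        # creation of the functioin that check for
--     b = ''
--     complementary = ''          # palindromic revers
--     for a in sub:
--         if a == 'A':
--             b = 'T'
--         elif a == 'T':
--             b = 'A'
--         elif a == 'C':
--             b = 'G'
--         elif a == 'G':
--             b = 'C'
--         complementary = F"{b}{complementary}"
--     return complementary == sub
-- ===== SOURCE B (Python) =====
-- # One O(n) pass: compare each character's complement with the string read
-- # backwards, instead of building the whole reverse complement by repeated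
-- # front-concatenation (O(n^2)).
-- def is_reverse_pal(sub):
--     comp = {'A': 'T', 'T': 'A', 'C': 'G', 'G': 'C'}
--     return all(comp.get(a) == r for a, r in zip(sub, reversed(sub)))
-- ===== Notes on version B (the rewrite author's own statement) =====
-- stated objective: faster
-- what changed: Replaces A's quadratic build of the whole reverse-complement string by repeated front-concatenation with a single O(n) pass that compares each character's complement against the string read backwards (any non-ACGT character makes the comparison fail, exactly as in A, whose built string can never match it).
import Mathlib
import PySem

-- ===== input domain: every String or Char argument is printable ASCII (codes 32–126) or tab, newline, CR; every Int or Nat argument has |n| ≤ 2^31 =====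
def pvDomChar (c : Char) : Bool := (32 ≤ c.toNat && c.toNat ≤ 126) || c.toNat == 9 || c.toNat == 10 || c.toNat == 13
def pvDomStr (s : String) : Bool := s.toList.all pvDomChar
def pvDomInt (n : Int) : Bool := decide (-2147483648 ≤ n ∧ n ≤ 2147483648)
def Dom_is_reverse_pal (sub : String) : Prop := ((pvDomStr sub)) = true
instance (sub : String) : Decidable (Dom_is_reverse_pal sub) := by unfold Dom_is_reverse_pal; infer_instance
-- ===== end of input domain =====

-- B replaces A's O(n^2) front-concatenation build of the reverse complement with
-- one O(n) pass comparing each character's complement against the reversed string.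

-- ===== PORT A =====
-- Python's `b` is a string that stays '' or holds one char: Option Char.
-- complementary is built by prepending b: b.toList ++ acc.
def is_reverse_pal (sub : String) : Bool :=
  let st := sub.toList.foldl
    (fun (st : Option Char × List Char) a =>
      let b : Option Char :=
        if a = 'A' then some 'T'
        else if a = 'T' then some 'A'
        else if a = 'C' then some 'G'
        else if a = 'G' then some 'C'
        else st.1
      (b, b.toList ++ st.2))
    (none, [])
  decide (st.2 = sub.toList)

-- ===== PORT B =====
-- comp.get(a) from Source B: the dict lookup, none when absent
def pvComp? (a : Char) : Option Char :=
  if a = 'A' then some 'T'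
  else if a = 'T' then some 'A'
  else if a = 'C' then some 'G'
  else if a = 'G' then some 'C'
  else none

-- all(comp.get(a) == r for a, r in zip(sub, reversed(sub)))
def is_reverse_pal_alt (sub : String) : Bool :=
  (sub.toList.zip sub.toList.reverse).all (fun p => pvComp? p.1 == some p.2)

-- ===== PRECONDITION & SPEC =====
def Spec_is_reverse_pal (sub : String) (out : Bool) : Prop := out = is_reverse_pal_alt sub
instance (sub : String) (out : Bool) : Decidable (Spec_is_reverse_pal sub out) := by unfold Spec_is_reverse_pal; infer_instance

-- ===== CLAIM (what is proved, stated in full; the proofs are below) =====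
def Claim_equal_is_reverse_pal : Prop := ∀ (sub : String), Dom_is_reverse_pal sub → Spec_is_reverse_pal sub (is_reverse_pal sub)

-- ===== LEMMAS AND PROOFS =====

-- A's carry step, abstracted
def pvStep (a : Char) (b : Option Char) : Option Char :=
  if a = 'A' then some 'T'
  else if a = 'T' then some 'A'
  else if a = 'C' then some 'G'
  else if a = 'G' then some 'C'
  else b

-- the reverse-complement list A builds, in recursive form
def pvRm : List Char → Option Char → List Char
  | [], _ => []
  | a :: t, b => let b' := pvStep a b; pvRm t b' ++ b'.toList

theorem foldl_eq_rm (l : List Char) (b : Option Char) (acc : List Char) :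
    (l.foldl (fun (st : Option Char × List Char) a =>
        let b := pvStep a st.1
        (b, b.toList ++ st.2)) (b, acc)).2 = pvRm l b ++ acc := by
  induction l generalizing b acc with
  | nil => simp [pvRm]
  | cons a t ih => simp [pvRm, ih]

-- when a is a valid base, the carry is irrelevant and the step is the dict lookup
theorem pvStep_of_valid (a : Char) (b : Option Char) (h : (pvComp? a).isSome) :
    pvStep a b = pvComp? a := by
  unfold pvStep pvComp?
  unfold pvComp? at h
  split_ifs at h ⊢ <;> simp_all

-- on an all-valid list, A builds exactly the reversed complement map
theorem rm_of_valid (l : List Char) (b : Option Char)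
    (h : ∀ c ∈ l, (pvComp? c).isSome) :
    pvRm l b = (l.filterMap pvComp?).reverse := by
  induction l generalizing b with
  | nil => simp [pvRm]
  | cons a t ih =>
    have ha : (pvComp? a).isSome := h a (by simp)
    obtain ⟨ca, hca⟩ := Option.isSome_iff_exists.mp ha
    simp only [pvRm, pvStep_of_valid a b ha, hca,
      List.filterMap_cons, List.reverse_cons,
      ih _ (fun c hc => h c (by simp [hc]))]
    simp

-- every character A ever writes into complementary is itself a valid base
theorem rm_mem_valid (l : List Char) (b : Option Char)
    (hb : ∀ c, b = some c → (pvComp? c).isSome) :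
    ∀ x ∈ pvRm l b, (pvComp? x).isSome := by
  induction l generalizing b with
  | nil => simp [pvRm]
  | cons a t ih =>
    intro x hx
    have hb' : ∀ c, pvStep a b = some c → (pvComp? c).isSome := by
      intro c hc
      unfold pvStep at hc
      split_ifs at hc with h1 h2 h3 h4
      · cases hc; decide
      · cases hc; decide
      · cases hc; decide
      · cases hc; decide
      · exact hb c hc
    simp only [pvRm, List.mem_append] at hx
    rcases hx with hx | hx
    · exact ih _ hb' x hx
    · exact hb' x (by cases h : pvStep a b <;> simp [h] at hx ⊢; simp [hx])

-- B's all-over-zip is the elementwise statement "l maps to r under comp"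
theorem all_zip_eq (l r : List Char) (h : l.length = r.length) :
    ((l.zip r).all (fun p => pvComp? p.1 == some p.2) = true) ↔
      l.filterMap pvComp? = r := by
  induction l generalizing r with
  | nil => cases r with
    | nil => simp
    | cons y s => simp at h
  | cons a t ih =>
    cases r with
    | nil => simp at h
    | cons y s =>
      simp only [List.length_cons, Nat.add_right_cancel_iff] at h
      cases hca : pvComp? a with
      | none =>
        simp only [List.zip_cons_cons, List.all_cons, hca, List.filterMap_cons]
        constructor
        · intro hfalse; simp at hfalse
        · intro heq
          have hle := List.length_filterMap_le pvComp? t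
          have := congrArg List.length heq
          simp at this; omega
      | some ca =>
        simp only [List.zip_cons_cons, List.all_cons, hca, List.filterMap_cons,
          Bool.and_eq_true, beq_iff_eq, Option.some.injEq, List.cons_eq_cons]
        rw [ih s h]

theorem is_reverse_pal_eq_rm (sub : String) :
    is_reverse_pal sub = decide (pvRm sub.toList none = sub.toList) := by
  unfold is_reverse_pal
  show decide ((sub.toList.foldl (fun (st : Option Char × List Char) a =>
      let b := pvStep a st.1
      (b, b.toList ++ st.2)) ((none : Option Char), ([] : List Char))).2 = sub.toList) = _
  rw [foldl_eq_rm]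
  simp

-- ===== VERDICT (by name: the statement is the Claim_ definition above) =====
theorem is_reverse_pal_spec : Claim_equal_is_reverse_pal := by
  intro sub _
  unfold Spec_is_reverse_pal is_reverse_pal_alt
  rw [is_reverse_pal_eq_rm]
  set l := sub.toList with hl
  by_cases hval : ∀ c ∈ l, (pvComp? c).isSome
  · -- all characters valid: both sides say "filterMap comp l = reverse l"
    rw [rm_of_valid l none hval]
    rw [Bool.eq_iff_iff, decide_eq_true_iff,
      all_zip_eq l l.reverse (by simp)]
    exact List.reverse_eq_iff
  · -- some invalid character: both sides are false
    push Not at hval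
    obtain ⟨c, hc, hcv⟩ := hval
    have hA : pvRm l none ≠ l := by
      intro he
      exact hcv (rm_mem_valid l none (by intro c h; cases h) c (by rw [he]; exact hc))
    obtain ⟨i, hi, hgi⟩ := List.getElem_of_mem hc
    have hB : (l.zip l.reverse).all (fun p => pvComp? p.1 == some p.2) = false := by
      rw [List.all_eq_false]
      refine ⟨(c, l.reverse[i]'(by simpa using hi)), ?_, ?_⟩
      · have : (l.zip l.reverse)[i]'(by simp [hi]) =
            (l[i], l.reverse[i]'(by simpa using hi)) := by
          simp
        rw [← hgi]
        exact this ▸ List.getElem_mem _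
      · simp only [beq_iff_eq]
        cases h : pvComp? c
        · simp
        · exact absurd (by simp [h]) hcv
    rw [hB, decide_eq_false hA]
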